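-- pv_equiv track=rewrite | github.com/CrisAlva1414/ENDDEIE | src/indicators/map_indicators.py | _clasificar_dimension_tematica
-- ===== SOURCE A (Python) =====
-- def _clasificar_dimension_tematica(indicador: str, actor: str) -> str:
--     """Clasifica un indicador en una dimension tematica segun su nombre y actor."""
--     ind = indicador.upper()
--
--     if any(k in ind for k in ["HAB_DIG", "HABILIDADES"]):
--         return "Capacidades Digitales"
--     elif any(k in ind for k in ["FREC_ACTS", "FREC_USO", "FREC_APR", "ACTIVIDADES"]):
--         return "Apropiacion Pedagogica"
--     elif any(k in ind for k in ["MOT_TIC", "VAL_TD", "PERC_IMP", "ACTITUDES"]):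
--         return "Cultura de Innovacion"
--     elif any(k in ind for k in ["CULT_INN", "PROM_CULT", "MEC_FORT", "INIC_MEJORA",
--                                  "COLAB_MEJORA", "DISP_IMPL", "IMPL_INN"]):
--         return "Gestion y Liderazgo"
--     elif any(k in ind for k in ["COND_INC", "COND_COMED", "PERC_COND",
--                                  "PERC_POLEDUC", "PERC_AMB", "PERC_MET",
--                                  "CONT_CAP", "BAJA_FLEX"]):
--         return "Condiciones Institucionales"
--     elif any(k in ind for k in ["FORM_TD", "FORM_CD", "FORM_PENSAR", "CON_IMPL"]):
--         return "Formacion y Desarrollo Profesional"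
--     elif any(k in ind for k in ["EFECTO", "PROT_EST", "INC_INTS", "APR_CLASES",
--                                  "PERC_TEC"]):
--         return "Efectos y Resultados"
--     elif any(k in ind for k in ["ACCESO", "NUM_ESP", "INC_TD_ENS"]):
--         return "Infraestructura y Acceso"
--     else:
--         return "Otros"
-- ===== SOURCE B (Python) =====
-- _PRIORIDAD = {
--     "HAB_DIG": (0, "Capacidades Digitales"),
--     "HABILIDADES": (0, "Capacidades Digitales"),
--     "FREC_ACTS": (1, "Apropiacion Pedagogica"),
--     "FREC_USO": (1, "Apropiacion Pedagogica"),
--     "FREC_APR": (1, "Apropiacion Pedagogica"),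
--     "ACTIVIDADES": (1, "Apropiacion Pedagogica"),
--     "MOT_TIC": (2, "Cultura de Innovacion"),
--     "VAL_TD": (2, "Cultura de Innovacion"),
--     "PERC_IMP": (2, "Cultura de Innovacion"),
--     "ACTITUDES": (2, "Cultura de Innovacion"),
--     "CULT_INN": (3, "Gestion y Liderazgo"),
--     "PROM_CULT": (3, "Gestion y Liderazgo"),
--     "MEC_FORT": (3, "Gestion y Liderazgo"),
--     "INIC_MEJORA": (3, "Gestion y Liderazgo"),
--     "COLAB_MEJORA": (3, "Gestion y Liderazgo"),
--     "DISP_IMPL": (3, "Gestion y Liderazgo"),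
--     "IMPL_INN": (3, "Gestion y Liderazgo"),
--     "COND_INC": (4, "Condiciones Institucionales"),
--     "COND_COMED": (4, "Condiciones Institucionales"),
--     "PERC_COND": (4, "Condiciones Institucionales"),
--     "PERC_POLEDUC": (4, "Condiciones Institucionales"),
--     "PERC_AMB": (4, "Condiciones Institucionales"),
--     "PERC_MET": (4, "Condiciones Institucionales"),
--     "CONT_CAP": (4, "Condiciones Institucionales"),
--     "BAJA_FLEX": (4, "Condiciones Institucionales"),
--     "FORM_TD": (5, "Formacion y Desarrollo Profesional"),
--     "FORM_CD": (5, "Formacion y Desarrollo Profesional"),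
--     "FORM_PENSAR": (5, "Formacion y Desarrollo Profesional"),
--     "CON_IMPL": (5, "Formacion y Desarrollo Profesional"),
--     "EFECTO": (6, "Efectos y Resultados"),
--     "PROT_EST": (6, "Efectos y Resultados"),
--     "INC_INTS": (6, "Efectos y Resultados"),
--     "APR_CLASES": (6, "Efectos y Resultados"),
--     "PERC_TEC": (6, "Efectos y Resultados"),
--     "ACCESO": (7, "Infraestructura y Acceso"),
--     "NUM_ESP": (7, "Infraestructura y Acceso"),
--     "INC_TD_ENS": (7, "Infraestructura y Acceso"),
-- }
--
--
-- def _clasificar_dimension_tematica(indicador: str, actor: str) -> str: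
--     """Clasifica un indicador en una dimension tematica segun su nombre y actor."""
--     ind = indicador.upper()
--     hits = [pl for kw, pl in _PRIORIDAD.items() if kw in ind]
--     return min(hits)[1] if hits else "Otros"
-- ===== Notes on version B (the rewrite author's own statement) =====
-- stated objective: alternative
-- what changed: B computes the set of ALL matching keywords from one flat keyword->(priority,dimension) map and reduces it with min over priorities, instead of A's ordered elif chain that early-returns on the first matching group.
import Mathlib
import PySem

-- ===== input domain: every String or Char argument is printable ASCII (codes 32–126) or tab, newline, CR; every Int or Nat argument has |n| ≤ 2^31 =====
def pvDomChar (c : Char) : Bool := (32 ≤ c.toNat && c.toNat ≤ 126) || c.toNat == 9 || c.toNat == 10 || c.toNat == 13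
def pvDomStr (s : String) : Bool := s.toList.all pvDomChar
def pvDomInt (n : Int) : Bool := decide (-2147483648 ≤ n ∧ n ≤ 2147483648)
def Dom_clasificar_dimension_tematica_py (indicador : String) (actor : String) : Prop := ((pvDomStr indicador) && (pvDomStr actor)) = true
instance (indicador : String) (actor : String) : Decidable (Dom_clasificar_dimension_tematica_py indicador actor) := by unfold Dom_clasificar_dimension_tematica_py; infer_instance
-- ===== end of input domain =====

-- B classifies by computing ALL matching keywords from one flat keyword->(priority,dimension) table
-- and reducing them with Python's min over (priority,label) pairs, instead of A's early-return elif chain (alternative).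


-- ===== PORT A =====
def clasificar_dimension_tematica_py (indicador : String) (actor : String) : String :=
  let ind := PySem.Str.upper indicador
  if ["HAB_DIG", "HABILIDADES"].any (fun k => PySem.Str.isIn k ind) then
    "Capacidades Digitales"
  else if ["FREC_ACTS", "FREC_USO", "FREC_APR", "ACTIVIDADES"].any (fun k => PySem.Str.isIn k ind) then
    "Apropiacion Pedagogica"
  else if ["MOT_TIC", "VAL_TD", "PERC_IMP", "ACTITUDES"].any (fun k => PySem.Str.isIn k ind) then
    "Cultura de Innovacion"
  else if ["CULT_INN", "PROM_CULT", "MEC_FORT", "INIC_MEJORA",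
           "COLAB_MEJORA", "DISP_IMPL", "IMPL_INN"].any (fun k => PySem.Str.isIn k ind) then
    "Gestion y Liderazgo"
  else if ["COND_INC", "COND_COMED", "PERC_COND",
           "PERC_POLEDUC", "PERC_AMB", "PERC_MET",
           "CONT_CAP", "BAJA_FLEX"].any (fun k => PySem.Str.isIn k ind) then
    "Condiciones Institucionales"
  else if ["FORM_TD", "FORM_CD", "FORM_PENSAR", "CON_IMPL"].any (fun k => PySem.Str.isIn k ind) then
    "Formacion y Desarrollo Profesional"
  else if ["EFECTO", "PROT_EST", "INC_INTS", "APR_CLASES",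
           "PERC_TEC"].any (fun k => PySem.Str.isIn k ind) then
    "Efectos y Resultados"
  else if ["ACCESO", "NUM_ESP", "INC_TD_ENS"].any (fun k => PySem.Str.isIn k ind) then
    "Infraestructura y Acceso"
  else
    "Otros"

-- ===== PORT B =====
-- the dict _PRIORIDAD: keyword -> (priority, dimension), as an association list in insertion order
def pvPrioridad : List (String × Int × String) :=
  [("HAB_DIG", (0, "Capacidades Digitales")),
   ("HABILIDADES", (0, "Capacidades Digitales")),
   ("FREC_ACTS", (1, "Apropiacion Pedagogica")),
   ("FREC_USO", (1, "Apropiacion Pedagogica")),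
   ("FREC_APR", (1, "Apropiacion Pedagogica")),
   ("ACTIVIDADES", (1, "Apropiacion Pedagogica")),
   ("MOT_TIC", (2, "Cultura de Innovacion")),
   ("VAL_TD", (2, "Cultura de Innovacion")),
   ("PERC_IMP", (2, "Cultura de Innovacion")),
   ("ACTITUDES", (2, "Cultura de Innovacion")),
   ("CULT_INN", (3, "Gestion y Liderazgo")),
   ("PROM_CULT", (3, "Gestion y Liderazgo")),
   ("MEC_FORT", (3, "Gestion y Liderazgo")),
   ("INIC_MEJORA", (3, "Gestion y Liderazgo")),
   ("COLAB_MEJORA", (3, "Gestion y Liderazgo")),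
   ("DISP_IMPL", (3, "Gestion y Liderazgo")),
   ("IMPL_INN", (3, "Gestion y Liderazgo")),
   ("COND_INC", (4, "Condiciones Institucionales")),
   ("COND_COMED", (4, "Condiciones Institucionales")),
   ("PERC_COND", (4, "Condiciones Institucionales")),
   ("PERC_POLEDUC", (4, "Condiciones Institucionales")),
   ("PERC_AMB", (4, "Condiciones Institucionales")),
   ("PERC_MET", (4, "Condiciones Institucionales")),
   ("CONT_CAP", (4, "Condiciones Institucionales")),
   ("BAJA_FLEX", (4, "Condiciones Institucionales")),
   ("FORM_TD", (5, "Formacion y Desarrollo Profesional")),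
   ("FORM_CD", (5, "Formacion y Desarrollo Profesional")),
   ("FORM_PENSAR", (5, "Formacion y Desarrollo Profesional")),
   ("CON_IMPL", (5, "Formacion y Desarrollo Profesional")),
   ("EFECTO", (6, "Efectos y Resultados")),
   ("PROT_EST", (6, "Efectos y Resultados")),
   ("INC_INTS", (6, "Efectos y Resultados")),
   ("APR_CLASES", (6, "Efectos y Resultados")),
   ("PERC_TEC", (6, "Efectos y Resultados")),
   ("ACCESO", (7, "Infraestructura y Acceso")),
   ("NUM_ESP", (7, "Infraestructura y Acceso")),
   ("INC_TD_ENS", (7, "Infraestructura y Acceso"))]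

-- Python '<' on (int, str) tuples: lexicographic, strict
def pvLtHit (x a : Int × String) : Bool := x.1 < a.1 || (x.1 == a.1 && x.2 < a.2)

-- Python min(hits): keeps the first minimal element
def pvMinHits (h : Int × String) (t : List (Int × String)) : Int × String :=
  t.foldl (fun acc x => if pvLtHit x acc then x else acc) h

def clasificar_dimension_tematica_py_alt (indicador : String) (actor : String) : String :=
  let ind := PySem.Str.upper indicador
  let hits := pvPrioridad.filterMap (fun kv => if PySem.Str.isIn kv.1 ind then some kv.2 else none)
  match hits with
  | [] => "Otros"
  | h :: t => (pvMinHits h t).2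

-- ===== PRECONDITION & SPEC =====
def Spec_clasificar_dimension_tematica_py (indicador : String) (actor : String) (out : String) : Prop := out = clasificar_dimension_tematica_py_alt indicador actor
instance (indicador : String) (actor : String) (out : String) : Decidable (Spec_clasificar_dimension_tematica_py indicador actor out) := by unfold Spec_clasificar_dimension_tematica_py; infer_instance

-- ===== CLAIM (what is proved, stated in full; the proofs are below) =====
def Claim_equal_clasificar_dimension_tematica_py : Prop := ∀ (indicador : String) (actor : String), Dom_clasificar_dimension_tematica_py indicador actor → Spec_clasificar_dimension_tematica_py indicador actor (clasificar_dimension_tematica_py indicador actor)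

-- ===== LEMMAS AND PROOFS =====

-- proof-side abstraction: the 8 rule groups in priority order
def pvGroups : List (List String × String) :=
  [(["HAB_DIG", "HABILIDADES"], "Capacidades Digitales"),
   (["FREC_ACTS", "FREC_USO", "FREC_APR", "ACTIVIDADES"], "Apropiacion Pedagogica"),
   (["MOT_TIC", "VAL_TD", "PERC_IMP", "ACTITUDES"], "Cultura de Innovacion"),
   (["CULT_INN", "PROM_CULT", "MEC_FORT", "INIC_MEJORA",
     "COLAB_MEJORA", "DISP_IMPL", "IMPL_INN"], "Gestion y Liderazgo"),
   (["COND_INC", "COND_COMED", "PERC_COND", "PERC_POLEDUC", "PERC_AMB",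
     "PERC_MET", "CONT_CAP", "BAJA_FLEX"], "Condiciones Institucionales"),
   (["FORM_TD", "FORM_CD", "FORM_PENSAR", "CON_IMPL"], "Formacion y Desarrollo Profesional"),
   (["EFECTO", "PROT_EST", "INC_INTS", "APR_CLASES", "PERC_TEC"], "Efectos y Resultados"),
   (["ACCESO", "NUM_ESP", "INC_TD_ENS"], "Infraestructura y Acceso")]

-- A's chain, abstractly: first matching group wins
def pvScan (g : List (List String × String)) (ind : String) : String :=
  match g with
  | [] => "Otros"
  | (kws, lab) :: rest =>
      if kws.any (fun k => PySem.Str.isIn k ind) then lab else pvScan rest ind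

-- B's hits, abstractly: per-group matched keywords tagged with the group's priority
def pvHitsOf (p : Int) (g : List (List String × String)) (ind : String) : List (Int × String) :=
  match g with
  | [] => []
  | (kws, lab) :: rest =>
      kws.filterMap (fun k => if PySem.Str.isIn k ind then some (p, lab) else none)
        ++ pvHitsOf (p + 1) rest ind

def pvMinRes (l : List (Int × String)) : String :=
  match l with
  | [] => "Otros"
  | h :: t => (pvMinHits h t).2

theorem pvMem_groupHits {kws : List String} {p : Int} {lab : String} {ind : String} {x : Int × String}
    (hx : x ∈ kws.filterMap (fun k => if PySem.Str.isIn k ind then some (p, lab) else none)) :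
    x = (p, lab) := by
  rcases List.mem_filterMap.1 hx with ⟨k, _, hk⟩
  split at hk
  · exact (Option.some.inj hk).symm
  · exact absurd hk (by simp)

theorem pvMem_hitsOf {p : Int} {g : List (List String × String)} {ind : String} {x : Int × String}
    (hx : x ∈ pvHitsOf p g ind) : p ≤ x.1 := by
  induction g generalizing p with
  | nil => simp [pvHitsOf] at hx
  | cons hd tl ih =>
      obtain ⟨kws, lab⟩ := hd
      simp only [pvHitsOf, List.mem_append] at hx
      rcases hx with hx | hx
      · rw [pvMem_groupHits hx]
      · have := ih hx
        omega

theorem pvMinHits_lb {p : Int} {lab : String} {t : List (Int × String)}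
    (H : ∀ x ∈ t, x = (p, lab) ∨ p < x.1) :
    pvMinHits (p, lab) t = (p, lab) := by
  induction t with
  | nil => rfl
  | cons x t ih =>
      have hx := H x (List.mem_cons_self ..)
      have hlt : pvLtHit x (p, lab) = false := by
        rcases hx with rfl | hx
        · simp [pvLtHit]
        · simp only [pvLtHit, Bool.or_eq_false_iff, Bool.and_eq_false_iff]
          constructor
          · simp; omega
          · left; simp; omega
      simp only [pvMinHits, List.foldl_cons, hlt]
      exact ih (fun y hy => H y (List.mem_cons_of_mem _ hy))

theorem pvMinRes_hitsOf (g : List (List String × String)) (p : Int) (ind : String) :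
    pvMinRes (pvHitsOf p g ind) = pvScan g ind := by
  induction g generalizing p with
  | nil => rfl
  | cons hd tl ih =>
      obtain ⟨kws, lab⟩ := hd
      by_cases hany : kws.any (fun k => PySem.Str.isIn k ind) = true
      · -- group matches: its hits are nonempty, all equal (p, lab), and dominate the rest
        rcases List.any_eq_true.1 hany with ⟨k, hk, hkin⟩
        have hmem : (p, lab) ∈ kws.filterMap (fun k => if PySem.Str.isIn k ind then some (p, lab) else none) :=
          List.mem_filterMap.2 ⟨k, hk, by rw [if_pos hkin]⟩
        have hne : kws.filterMap (fun k => if PySem.Str.isIn k ind then some (p, lab) else none) ≠ [] := by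
          intro hnil
          rw [hnil] at hmem
          exact absurd hmem (List.not_mem_nil)
        obtain ⟨h, t, hht⟩ := List.exists_cons_of_ne_nil hne
        have hhead : h = (p, lab) := pvMem_groupHits (by rw [hht]; exact List.mem_cons_self ..)
        simp only [pvHitsOf, pvScan, hany, if_true, hht, hhead, List.cons_append, pvMinRes]
        have : pvMinHits (p, lab) (t ++ pvHitsOf (p + 1) tl ind) = (p, lab) := by
          apply pvMinHits_lb
          intro x hx
          rcases List.mem_append.1 hx with hx | hx
          · left; exact pvMem_groupHits (by rw [hht]; exact List.mem_cons_of_mem _ hx)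
          · right; have := pvMem_hitsOf hx; omega
        rw [this]
      · -- group does not match: its hits are empty
        have hempty : kws.filterMap (fun k => if PySem.Str.isIn k ind then some (p, lab) else none) = [] := by
          rw [List.filterMap_eq_nil_iff]
          intro k hk
          cases hq : PySem.Str.isIn k ind with
          | false => rfl
          | true => exact absurd (List.any_eq_true.2 ⟨k, hk, hq⟩) hany
        simp only [pvHitsOf, pvScan, hany, hempty, List.nil_append]
        exact ih (p + 1)

-- the flat table is the flattening of the tagged groups
theorem pvGroupFlat (kws : List String) (p : Int) (lab : String) (ind : String) :
    (kws.map (fun k => (k, (p, lab)))).filterMap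
        (fun kv => if PySem.Str.isIn kv.1 ind then some kv.2 else none)
      = kws.filterMap (fun k => if PySem.Str.isIn k ind then some (p, lab) else none) := by
  rw [List.filterMap_map]
  rfl

theorem pvPrioridad_filterMap (ind : String) :
    pvPrioridad.filterMap (fun kv => if PySem.Str.isIn kv.1 ind then some kv.2 else none)
      = pvHitsOf 0 pvGroups ind := by
  have hflat : pvPrioridad =
      (["HAB_DIG", "HABILIDADES"].map (fun k => (k, ((0 : Int), "Capacidades Digitales"))))
      ++ (["FREC_ACTS", "FREC_USO", "FREC_APR", "ACTIVIDADES"].map (fun k => (k, ((1 : Int), "Apropiacion Pedagogica"))))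
      ++ (["MOT_TIC", "VAL_TD", "PERC_IMP", "ACTITUDES"].map (fun k => (k, ((2 : Int), "Cultura de Innovacion"))))
      ++ (["CULT_INN", "PROM_CULT", "MEC_FORT", "INIC_MEJORA",
           "COLAB_MEJORA", "DISP_IMPL", "IMPL_INN"].map (fun k => (k, ((3 : Int), "Gestion y Liderazgo"))))
      ++ (["COND_INC", "COND_COMED", "PERC_COND", "PERC_POLEDUC", "PERC_AMB",
           "PERC_MET", "CONT_CAP", "BAJA_FLEX"].map (fun k => (k, ((4 : Int), "Condiciones Institucionales"))))
      ++ (["FORM_TD", "FORM_CD", "FORM_PENSAR", "CON_IMPL"].map (fun k => (k, ((5 : Int), "Formacion y Desarrollo Profesional"))))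
      ++ (["EFECTO", "PROT_EST", "INC_INTS", "APR_CLASES", "PERC_TEC"].map (fun k => (k, ((6 : Int), "Efectos y Resultados"))))
      ++ (["ACCESO", "NUM_ESP", "INC_TD_ENS"].map (fun k => (k, ((7 : Int), "Infraestructura y Acceso")))) := by
    rfl
  rw [hflat]
  simp only [List.filterMap_append, pvGroupFlat, pvGroups, pvHitsOf, List.append_nil,
    List.append_assoc]
  norm_num
  rfl

theorem clasificar_A_eq_scan (indicador actor : String) :
    clasificar_dimension_tematica_py indicador actor = pvScan pvGroups (PySem.Str.upper indicador) := by
  simp only [clasificar_dimension_tematica_py, pvScan, pvGroups]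

theorem clasificar_B_eq_minres (indicador actor : String) :
    clasificar_dimension_tematica_py_alt indicador actor
      = pvMinRes (pvHitsOf 0 pvGroups (PySem.Str.upper indicador)) := by
  simp only [clasificar_dimension_tematica_py_alt, pvMinRes, pvPrioridad_filterMap]

-- ===== VERDICT (by name: the statement is the Claim_ definition above) =====
theorem clasificar_dimension_tematica_py_spec : Claim_equal_clasificar_dimension_tematica_py := by
  intro indicador actor _
  unfold Spec_clasificar_dimension_tematica_py
  rw [clasificar_A_eq_scan indicador actor, clasificar_B_eq_minres indicador actor,
    pvMinRes_hitsOf]
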